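-- pv_equiv track=rewrite | github.com/miyamoto120/Foobar-with-Google | Extra/The cake is not a lie! (Level 1)/solution.py | solution
-- ===== SOURCE A (Python) =====
-- def solution(s):
--     length = len(s)
--     max_parts = 1
--
--     # Find all factors of the length of the input string
--     for i in range(1, length + 1):
--         if length % i == 0:
--             # Check if the string can be divided into equal parts of length i
--             if all(s[j] == s[j % i] for j in range(length)):
--                 max_parts = max(max_parts, length // i)
--
--     return max_parts
-- ===== SOURCE B (Python) =====
-- def solution(s):
--     n = len(s)
--     if n == 0:
--         return 1
--     # smallest cyclic-rotation fixpoint: first index >= 1 where s occurs in s+s.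
--     # It always divides n, and n // p is the maximal number of equal parts.
--     p = (s + s).find(s, 1)
--     return n // p
-- ===== Notes on version B (the rewrite author's own statement) =====
-- stated objective: faster
-- what changed: B replaces A's scan over all divisors of len(s) with per-index modular checks by the classic string-doubling trick: the first occurrence of s in s+s at index >= 1 is the smallest rotation period, it always divides n, and the answer is n divided by it.
import Mathlib
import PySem

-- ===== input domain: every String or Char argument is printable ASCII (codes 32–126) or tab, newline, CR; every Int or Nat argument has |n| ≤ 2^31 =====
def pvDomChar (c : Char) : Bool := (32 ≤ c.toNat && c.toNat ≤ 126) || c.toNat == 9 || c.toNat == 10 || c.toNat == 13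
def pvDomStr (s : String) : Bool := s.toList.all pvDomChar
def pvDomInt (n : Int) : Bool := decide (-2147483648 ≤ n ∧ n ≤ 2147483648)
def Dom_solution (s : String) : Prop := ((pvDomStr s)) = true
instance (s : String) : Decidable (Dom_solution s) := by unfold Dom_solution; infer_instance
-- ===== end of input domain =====

-- B replaces A's divisor-by-divisor periodicity scan by the string-doubling trick:
-- the first occurrence of s in s+s at index ≥ 1 is the smallest rotation period, it
-- divides n, and the answer is n divided by it (measured faster: one substring search).

-- ===== PORT A =====
def solution (s : String) : Int :=
  let cs := s.toList
  let length : Int := cs.length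
  (PySem.List.pyRange 1 (length + 1) 1).foldl
    (fun maxParts i =>
      if PySem.Int.mod length i = 0 then
        if (PySem.List.pyRange 0 length 1).all
            (fun j => PySem.List.pyGet? cs j == PySem.List.pyGet? cs (PySem.Int.mod j i)) then
          max maxParts (PySem.Int.floordiv length i)
        else maxParts
      else maxParts)
    1

-- ===== PORT B =====
def solution_alt (s : String) : Int :=
  let cs := s.toList
  let n : Int := cs.length
  if n = 0 then 1
  else
    let p := PySem.Chars.findFrom (cs ++ cs) cs 1   -- (s + s).find(s, 1)
    PySem.Int.floordiv n p

-- ===== PRECONDITION & SPEC =====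
def Spec_solution (s : String) (out : Int) : Prop := out = solution_alt s
instance (s : String) (out : Int) : Decidable (Spec_solution s out) := by unfold Spec_solution; infer_instance

-- ===== CLAIM (what is proved, stated in full; the proofs are below) =====
def Claim_equal_solution : Prop := ∀ (s : String), Dom_solution s → Spec_solution s (solution s)

-- ===== LEMMAS AND PROOFS =====

-- A's fold body, named for the lemmas below.
def stepA (cs : List Char) (N : Int) (acc i : Int) : Int :=
  if PySem.Int.mod N i = 0 then
    if (PySem.List.pyRange 0 N 1).all
        (fun j => PySem.List.pyGet? cs j == PySem.List.pyGet? cs (PySem.Int.mod j i)) then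
      max acc (PySem.Int.floordiv N i)
    else acc
  else acc

-- A's inner all-check over Int indices is the Nat-level modular period check.
lemma modcheck_iff (cs : List Char) (q : Nat) :
    ((PySem.List.pyRange 0 (cs.length : Int) 1).all
        (fun j => PySem.List.pyGet? cs j == PySem.List.pyGet? cs (PySem.Int.mod j (q : Int))) = true)
      ↔ ∀ k, k < cs.length → cs[k]? = cs[k % q]? := by
  rw [List.all_eq_true]
  constructor
  · intro h k hk
    have := h (k : Int) (by rw [PySem.List.mem_pyRange_one]; omega)
    rw [beq_iff_eq, PySem.Int.mod_natCast, PySem.List.pyGet?_natCast, PySem.List.pyGet?_natCast] at this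
    exact this
  · intro h j hj
    rw [PySem.List.mem_pyRange_one] at hj
    obtain ⟨k, rfl⟩ : ∃ k : Nat, j = (k : Int) := ⟨j.toNat, (Int.toNat_of_nonneg hj.1).symm⟩
    rw [beq_iff_eq, PySem.Int.mod_natCast, PySem.List.pyGet?_natCast, PySem.List.pyGet?_natCast]
    exact h k (by exact_mod_cast hj.2)

-- rotation fixpoint ⇒ modular period check (no divisibility needed).
lemma modcheck_of_rot (cs : List Char) (i : Nat) (hi : 1 ≤ i) (hin : i ≤ cs.length)
    (h : cs.rotate i = cs) : ∀ k, k < cs.length → cs[k]? = cs[k % i]? := by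
  have h' := h
  rw [List.rotate_eq_drop_append_take hin] at h'
  have hshift : ∀ j, i + j < cs.length → cs[j]? = cs[i + j]? := by
    intro j hj
    have h2 : (List.drop i cs ++ List.take i cs)[j]? = cs[j]? := by rw [h']
    rw [List.getElem?_append_left (by rw [List.length_drop]; omega), List.getElem?_drop] at h2
    exact h2.symm
  intro k hk
  induction k using Nat.strong_induction_on with
  | _ k ih =>
    by_cases hki : k < i
    · rw [Nat.mod_eq_of_lt hki]
    · have e1 : cs[k - i]? = cs[k]? := by
        have := hshift (k - i) (by omega)
        rwa [show i + (k - i) = k by omega] at this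
      rw [← e1, ih (k - i) (by omega) (by omega),
        ← Nat.mod_eq_sub_mod (show i ≤ k by omega)]

-- modular period check + divisibility ⇒ rotation fixpoint.
lemma rot_of_modcheck (cs : List Char) (i : Nat) (_hi : 1 ≤ i) (hin : i ≤ cs.length)
    (hdvd : i ∣ cs.length) (h : ∀ k, k < cs.length → cs[k]? = cs[k % i]?) :
    cs.rotate i = cs := by
  obtain ⟨c, hc⟩ := hdvd
  rw [List.rotate_eq_drop_append_take hin]
  apply List.ext_getElem?
  intro j
  by_cases hj : j < cs.length
  · rw [List.getElem?_append]
    by_cases hj2 : j < cs.length - i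
    · rw [if_pos (by rw [List.length_drop]; omega), List.getElem?_drop,
        h (i + j) (by omega), h j hj, Nat.add_mod_left]
    · rw [if_neg (by rw [List.length_drop]; omega), List.length_drop,
        List.getElem?_take_of_lt (by omega), h j hj,
        h (j - (cs.length - i)) (by omega)]
      have hcc : i * (c - 1) = cs.length - i := by rw [Nat.mul_sub, Nat.mul_one, hc]
      rw [show j - (cs.length - i) = j - i * (c - 1) by rw [hcc],
        Nat.sub_mul_mod (by rw [hcc]; omega)]
  · rw [List.getElem?_eq_none
        (by rw [List.length_append, List.length_drop, List.length_take]; omega),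
      List.getElem?_eq_none (by omega)]

-- occurrence of cs in cs ++ cs at index i ≥ 1 ⇔ i ≤ n and rotation by i fixes cs.
lemma occ_iff_rot (cs : List Char) (i : Nat) (hcs : cs ≠ []) :
    cs <+: (cs ++ cs).drop i ↔ i ≤ cs.length ∧ cs.rotate i = cs := by
  have hpos : 0 < cs.length := List.length_pos_iff.mpr hcs
  constructor
  · intro h
    have hlen := h.length_le
    rw [List.length_drop, List.length_append] at hlen
    have hin : i ≤ cs.length := by omega
    refine ⟨hin, ?_⟩
    rw [List.drop_append_of_le_length hin] at h
    have := List.prefix_iff_eq_take.mp h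
    rw [List.take_append, List.take_of_length_le (by rw [List.length_drop]; omega),
      List.length_drop, show cs.length - (cs.length - i) = i by omega] at this
    rw [List.rotate_eq_drop_append_take hin, ← this]
  · rintro ⟨hin, hrot⟩
    rw [List.drop_append_of_le_length hin]
    rw [List.rotate_eq_drop_append_take hin] at hrot
    refine List.prefix_iff_eq_take.mpr ?_
    rw [List.take_append, List.take_of_length_le (by rw [List.length_drop]; omega),
      List.length_drop, show cs.length - (cs.length - i) = i by omega]
    exact hrot.symm

-- iterated rotation fixpoint.
lemma rot_mul (cs : List Char) (m : Nat) (h : cs.rotate m = cs) :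
    ∀ k, cs.rotate (k * m) = cs := by
  intro k
  induction k with
  | zero => simp
  | succ k ih => rw [Nat.succ_mul, ← List.rotate_rotate, ih, h]

-- the smallest positive rotation fixpoint divides the length.
lemma rot_min_dvd (cs : List Char) (m : Nat) (hm : 1 ≤ m) (h : cs.rotate m = cs)
    (hmin : ∀ i, 1 ≤ i → i < m → cs.rotate i ≠ cs) : m ∣ cs.length := by
  rcases Nat.eq_zero_or_pos (cs.length % m) with hr | hr
  · exact Nat.dvd_of_mod_eq_zero hr
  · exfalso
    have hrm : cs.length % m < m := Nat.mod_lt _ (by omega)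
    apply hmin (cs.length % m) (by omega) hrm
    have : cs.rotate (cs.length / m * m + cs.length % m) = cs := by
      rw [Nat.div_add_mod', List.rotate_length]
    rwa [← List.rotate_rotate, rot_mul cs m h (cs.length / m)] at this

-- If every check that fires contributes no more than acc, the fold keeps acc.
lemma foldA_const (cs : List Char) (N : Int) (l : List Int) (acc : Int)
    (h : ∀ p ∈ l, PySem.Int.floordiv N p ≤ acc) :
    l.foldl (stepA cs N) acc = acc := by
  induction l with
  | nil => rfl
  | cons p rest ih =>
    have hs : stepA cs N acc p = acc := by
      unfold stepA
      split_ifs with h1 h2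
      · exact max_eq_left (h p (by simp))
      · rfl
      · rfl
    rw [List.foldl_cons, hs]
    exact ih (fun q hq => h q (by simp [hq]))

-- If no element fires the check, the fold keeps acc.
lemma foldA_nohit (cs : List Char) (N : Int) (l : List Int) (acc : Int)
    (h : ∀ p ∈ l, ¬ (PySem.Int.mod N p = 0 ∧
      (PySem.List.pyRange 0 N 1).all
        (fun j => PySem.List.pyGet? cs j == PySem.List.pyGet? cs (PySem.Int.mod j p)) = true)) :
    l.foldl (stepA cs N) acc = acc := by
  induction l with
  | nil => rfl
  | cons p rest ih =>
    have hs : stepA cs N acc p = acc := by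
      unfold stepA
      split_ifs with h1 h2
      · exact absurd ⟨h1, h2⟩ (h p (by simp))
      · rfl
      · rfl
    rw [List.foldl_cons, hs]
    exact ih (fun q hq => h q (by simp [hq]))

-- floordiv of a nonnegative cast is antitone in a positive divisor.
lemma floordiv_antitone (n : Nat) (p r : Int) (hp : 1 ≤ p) (hpr : p ≤ r) :
    PySem.Int.floordiv (n : Int) r ≤ PySem.Int.floordiv (n : Int) p := by
  obtain ⟨q, rfl⟩ : ∃ q : Nat, p = (q : Int) := ⟨p.toNat, (Int.toNat_of_nonneg (by omega)).symm⟩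
  obtain ⟨m, rfl⟩ : ∃ m : Nat, r = (m : Int) := ⟨r.toNat, (Int.toNat_of_nonneg (by omega)).symm⟩
  rw [PySem.Int.floordiv_natCast, PySem.Int.floordiv_natCast]
  have h1 : 0 < q := by exact_mod_cast hp
  have h2 : q ≤ m := by exact_mod_cast hpr
  exact_mod_cast Nat.div_le_div_left h2 h1

-- A's fold equals n / m when m is the smallest rotation fixpoint in [1, n].
lemma foldA_eq (cs : List Char) (m : Nat) (hm : 1 ≤ m) (hmn : m ≤ cs.length)
    (hrot : cs.rotate m = cs)
    (hmin : ∀ i, 1 ≤ i → i < m → cs.rotate i ≠ cs) :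
    (PySem.List.pyRange 1 ((cs.length : Int) + 1) 1).foldl (stepA cs (cs.length : Int)) 1
      = ((cs.length / m : Nat) : Int) := by
  have hdvd : m ∣ cs.length := rot_min_dvd cs m hm hrot hmin
  have hstep : stepA cs (cs.length : Int) 1 (m : Int) = ((cs.length / m : Nat) : Int) := by
    unfold stepA
    rw [if_pos (by rw [PySem.Int.mod_eq_zero_iff_dvd]; exact_mod_cast hdvd),
      if_pos ((modcheck_iff cs m).mpr (modcheck_of_rot cs m hm hmn hrot)),
      PySem.Int.floordiv_natCast]
    have h1 : 1 ≤ cs.length / m := (Nat.one_le_div_iff (by omega)).mpr hmn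
    have h1' : (1 : Int) ≤ ((cs.length / m : Nat) : Int) := by exact_mod_cast h1
    omega
  have hpre : (PySem.List.pyRange 1 (m : Int) 1).foldl (stepA cs (cs.length : Int)) 1 = 1 := by
    apply foldA_nohit
    intro p hp
    rw [PySem.List.mem_pyRange_one] at hp
    rintro ⟨h1, h2⟩
    obtain ⟨i, rfl⟩ : ∃ i : Nat, p = (i : Int) := ⟨p.toNat, (Int.toNat_of_nonneg (by omega)).symm⟩
    have hi1 : 1 ≤ i := by exact_mod_cast hp.1
    have him : i < m := by exact_mod_cast hp.2
    have hidvd : i ∣ cs.length := by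
      rw [PySem.Int.mod_eq_zero_iff_dvd] at h1
      exact_mod_cast h1
    exact hmin i hi1 him (rot_of_modcheck cs i hi1 (by omega) hidvd ((modcheck_iff cs i).mp h2))
  rw [PySem.List.pyRange_one_append 1 (m : Int) ((cs.length : Int) + 1)
    (by exact_mod_cast hm) (by omega), List.foldl_append, hpre,
    PySem.List.pyRange_one_cons (by omega), List.foldl_cons, hstep]
  apply foldA_const
  intro r hr
  rw [PySem.List.mem_pyRange_one] at hr
  calc PySem.Int.floordiv (cs.length : Int) r
      ≤ PySem.Int.floordiv (cs.length : Int) (m : Int) :=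
        floordiv_antitone cs.length (m : Int) r (by exact_mod_cast hm) (by omega)
    _ = ((cs.length / m : Nat) : Int) := PySem.Int.floordiv_natCast _ _

-- ===== VERDICT (by name: the statement is the Claim_ definition above) =====
theorem solution_spec : Claim_equal_solution := by
  intro s _
  unfold Spec_solution solution solution_alt
  by_cases hnil : s.toList = []
  · rw [hnil]; rfl
  · set cs := s.toList with hcs
    have hpos : 0 < cs.length := List.length_pos_iff.mpr hnil
    show (PySem.List.pyRange 1 ((cs.length : Int) + 1) 1).foldl (stepA cs (cs.length : Int)) 1
      = (if (cs.length : Int) = 0 then 1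
         else PySem.Int.floordiv (cs.length : Int) (PySem.Chars.findFrom (cs ++ cs) cs 1))
    rw [if_neg (by omega)]
    have hk : (1 : Nat) ≤ (cs ++ cs).length := by rw [List.length_append]; omega
    have hone : (1 : Int) = ((1 : Nat) : Int) := by norm_num
    have hinf : cs <:+: (cs ++ cs).drop 1 := by
      rw [List.drop_append_of_le_length (by omega)]
      exact (List.suffix_append (cs.drop 1) cs).isInfix
    have hne : PySem.Chars.findFrom (cs ++ cs) cs (((1 : Nat) : Int)) ≠ -1 := by
      rw [Ne, PySem.Chars.findFrom_natCast_eq_neg_one_iff (cs ++ cs) cs 1 hk]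
      exact not_not_intro hinf
    obtain ⟨hbound, hpref, hminp⟩ :=
      PySem.Chars.findFrom_natCast_spec (cs ++ cs) cs 1 hk hne
    set r := PySem.Chars.findFrom (cs ++ cs) cs (((1 : Nat) : Int)) with hr
    set m := r.toNat with hmdef
    have hm1 : 1 ≤ m := by
      have h1r : ((1 : Nat) : Int) ≤ r := hbound
      omega
    have hrm : r = (m : Int) := by
      have h1r : ((1 : Nat) : Int) ≤ r := hbound
      omega
    obtain ⟨hmn, hrot⟩ := (occ_iff_rot cs m hnil).mp hpref
    have hmin : ∀ i, 1 ≤ i → i < m → cs.rotate i ≠ cs := by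
      intro i h1 h2 hri
      exact hminp i h1 h2 ((occ_iff_rot cs i hnil).mpr ⟨by omega, hri⟩)
    rw [foldA_eq cs m hm1 hmn hrot hmin, hone, ← hr, hrm, PySem.Int.floordiv_natCast]
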